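-- pv_equiv track=rewrite | github.com/DemoAuguste/ApricotTOSEM | Apricot/Apricot_utils2.py | get_sum_sign_weights
-- ===== SOURCE A (Python) =====
-- def get_sum_sign_weights(sign_weights_list):
--     sum_weights = None
--     for w in sign_weights_list:
--         if sum_weights is None:
--             sum_weights = w
--         else:
--             sum_weights = [item[0] + item[1] for item in zip(sum_weights, w)]
--     return sum_weights
-- ===== SOURCE B (Python) =====
-- def get_sum_sign_weights(sign_weights_list):
--     if not sign_weights_list:
--         return None
--     return [sum(col) for col in zip(*sign_weights_list)]
-- ===== Notes on version B (the rewrite author's own statement) =====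
-- stated objective: simpler
-- what changed: B transposes the list with zip(*...) and sums each column in one comprehension instead of folding a running accumulator vector that is re-zipped with every successive vector.
-- outside the precondition, e.g. on get_sum_sign_weights([]): A returns None, B returns None
import Mathlib
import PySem

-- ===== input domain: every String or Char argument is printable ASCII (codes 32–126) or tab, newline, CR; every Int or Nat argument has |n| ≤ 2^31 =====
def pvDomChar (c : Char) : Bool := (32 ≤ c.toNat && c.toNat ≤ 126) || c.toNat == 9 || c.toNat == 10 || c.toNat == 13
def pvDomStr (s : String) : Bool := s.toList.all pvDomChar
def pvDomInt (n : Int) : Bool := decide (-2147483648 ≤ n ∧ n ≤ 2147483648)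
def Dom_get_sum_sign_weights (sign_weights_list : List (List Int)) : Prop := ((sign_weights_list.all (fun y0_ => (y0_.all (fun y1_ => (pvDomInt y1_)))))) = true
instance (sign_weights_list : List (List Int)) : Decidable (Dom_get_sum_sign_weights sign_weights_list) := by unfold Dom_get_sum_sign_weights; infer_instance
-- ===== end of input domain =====

-- B replaces A's running-accumulator fold (re-zipping the partial sum with each vector)
-- by a zip(*...) transpose summing each column once; objective: simpler.
-- On the empty list both Pythons return None (not a list of ints), so Pre_ excludes it.

-- ===== PORT A =====
-- A folds with an Optional accumulator: None → first vector; otherwise elementwise sum via zip.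
def get_sum_sign_weights (sign_weights_list : List (List Int)) : List Int :=
  (sign_weights_list.foldl
    (fun sum_weights w =>
      match sum_weights with
      | none => some w
      | some s => some ((s.zip w).map (fun item => item.1 + item.2)))
    none).getD []   -- Python returns None on the empty list; excluded by Pre_

-- ===== PORT B =====
-- zip(*lst) yields one tuple per column, up to the shortest row; sum each column.
def get_sum_sign_weights_alt (sign_weights_list : List (List Int)) : List Int :=
  match sign_weights_list with
  | [] => []       -- Python B returns None here; excluded by Pre_
  | l :: rest =>
    let m := rest.foldl (fun acc w => min acc w.length) l.length
    (List.range m).map (fun j => ((l :: rest).map (fun w => w.getD j 0)).sum)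

-- ===== PRECONDITION & SPEC =====
-- Pre_ excludes only the empty list, where both Pythons return None, which is not a list of ints.
def Pre_get_sum_sign_weights (sign_weights_list : List (List Int)) : Prop := sign_weights_list ≠ []
instance (sign_weights_list : List (List Int)) : Decidable (Pre_get_sum_sign_weights sign_weights_list) := by unfold Pre_get_sum_sign_weights; infer_instance
def pvWitness_get_sum_sign_weights : List (List Int) := [[1, 2], [3, 4]]

def Spec_get_sum_sign_weights (sign_weights_list : List (List Int)) (out : List Int) : Prop := out = get_sum_sign_weights_alt sign_weights_list
instance (sign_weights_list : List (List Int)) (out : List Int) : Decidable (Spec_get_sum_sign_weights sign_weights_list out) := by unfold Spec_get_sum_sign_weights; infer_instance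

-- ===== CLAIM (what is proved, stated in full; the proofs are below) =====
def Claim_equal_get_sum_sign_weights : Prop := ∀ (sign_weights_list : List (List Int)), Dom_get_sum_sign_weights sign_weights_list → Pre_get_sum_sign_weights sign_weights_list → Spec_get_sum_sign_weights sign_weights_list (get_sum_sign_weights sign_weights_list)

-- ===== LEMMAS AND PROOFS =====

-- the running min-length fold never exceeds its starting value
lemma pvFoldMin_le (rest : List (List Int)) (a : Nat) :
    rest.foldl (fun acc w => min acc w.length) a ≤ a := by
  induction rest generalizing a with
  | nil => simp
  | cons w rest ih => exact le_trans (ih (min a w.length)) (min_le_left _ _)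

-- shorthand for A's accumulator step starting from a concrete vector
def pvStep (s w : List Int) : List Int := (s.zip w).map (fun item => item.1 + item.2)

lemma pvStep_length (s w : List Int) : (pvStep s w).length = min s.length w.length := by
  simp [pvStep]

lemma pvStep_getD (s w : List Int) (j : Nat) (hj : j < min s.length w.length) :
    (pvStep s w).getD j 0 = s.getD j 0 + w.getD j 0 := by
  rcases Nat.lt_min.mp hj with ⟨h1, h2⟩
  simp [pvStep, List.getD_eq_getElem?_getD, h1, h2]

-- closed form of the nonempty fold: columnwise sums up to the running min length
lemma pvFold_eq (rest : List (List Int)) (l : List Int) :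
    rest.foldl (fun s w => pvStep s w) l =
      (List.range (rest.foldl (fun acc w => min acc w.length) l.length)).map
        (fun j => ((l :: rest).map (fun w => w.getD j 0)).sum) := by
  induction rest generalizing l with
  | nil =>
      simp only [List.foldl_nil, List.map_cons, List.map_nil, List.sum_cons, List.sum_nil,
        add_zero]
      apply List.ext_getElem (by simp)
      intro j h1 h2
      simp [List.getD_eq_getElem?_getD, h1]
  | cons w rest ih =>
      simp only [List.foldl_cons]
      rw [ih (pvStep l w)]
      rw [pvStep_length]
      apply List.ext_getElem (by simp)
      intro j h1 h2
      simp only [List.getElem_map, List.getElem_range, List.map_cons, List.sum_cons]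
      rw [pvStep_getD]
      · ring
      · have hj : j < rest.foldl (fun acc w => min acc w.length) (min l.length w.length) := by
          simpa using h1
        exact lt_of_lt_of_le hj (pvFoldMin_le rest _)

-- ===== VERDICT (by name: the statement is the Claim_ definition above) =====
theorem get_sum_sign_weights_spec : Claim_equal_get_sum_sign_weights := by
  intro ls _ hpre
  rcases ls with _ | ⟨l, rest⟩
  · exact absurd rfl hpre
  · show get_sum_sign_weights (l :: rest) = get_sum_sign_weights_alt (l :: rest)
    have h : ∀ (r : List (List Int)) (s : List Int),
        r.foldl (fun sum_weights w =>
          match sum_weights with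
          | none => some w
          | some s => some ((s.zip w).map (fun item => item.1 + item.2))) (some s)
        = some (r.foldl (fun s w => pvStep s w) s) := by
      intro r
      induction r with
      | nil => intro s; rfl
      | cons w r ih => intro s; simp only [List.foldl_cons]; exact ih _
    simp only [get_sum_sign_weights, get_sum_sign_weights_alt, List.foldl_cons, h, Option.getD_some]
    exact pvFold_eq rest l
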